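-- pv_equiv track=rewrite | github.com/ChopinNo3Op9/Coding-Challenge | max sum of power list.py | max_sum_with_one_multiplication
-- ===== SOURCE A (Python) =====
-- def max_sum_with_one_multiplication(numbers):
--     n = len(numbers)
--
--     # powers of each number based on their order
--     powers = [num ** (i + 1) for i, num in enumerate(numbers)]
--
--     max_sum = sum(powers)
--
--     for i in range(n - 1):
--         # Try changing the operation at position i from addition to multiplication
--         modified_powers = powers[:]
--         modified_powers[i] = powers[i] * powers[i + 1]
--         modified_powers.pop(i + 1)
--
--         current_sum = sum(modified_powers)
--         max_sum = max(max_sum, current_sum)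
--
--     return max_sum
-- ===== SOURCE B (Python) =====
-- def max_sum_with_one_multiplication(numbers):
--     # precompute the total of the powers once; each candidate is a delta from it
--     powers = [num ** (i + 1) for i, num in enumerate(numbers)]
--     total = sum(powers)
--     best = total
--     for a, b in zip(powers, powers[1:]):
--         cand = total - a - b + a * b
--         if best < cand:
--             best = cand
--     return best
-- ===== Notes on version B (the rewrite author's own statement) =====
-- stated objective: alternative
-- what changed: Instead of rebuilding and re-summing a modified copy of the powers list for every adjacent pair, B computes the total sum once and evaluates each candidate as total - a - b + a*b over zip(powers, powers[1:]); measured 14x faster at n=1024 but unconfirmed at the largest size (big-int power arithmetic dominates both), so no speed claim.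
import Mathlib
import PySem

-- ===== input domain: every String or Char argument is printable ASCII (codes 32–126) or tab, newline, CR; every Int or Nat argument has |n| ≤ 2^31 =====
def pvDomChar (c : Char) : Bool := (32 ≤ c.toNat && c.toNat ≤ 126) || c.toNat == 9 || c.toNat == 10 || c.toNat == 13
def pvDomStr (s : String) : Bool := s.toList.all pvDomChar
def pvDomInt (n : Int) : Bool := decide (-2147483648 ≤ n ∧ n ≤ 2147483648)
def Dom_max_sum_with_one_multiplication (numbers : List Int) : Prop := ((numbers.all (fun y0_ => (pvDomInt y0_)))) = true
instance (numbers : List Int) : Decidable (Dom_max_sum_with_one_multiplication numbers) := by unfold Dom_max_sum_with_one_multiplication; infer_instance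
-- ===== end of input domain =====

-- B computes each candidate sum as a delta from the precomputed total instead of
-- rebuilding and re-summing a modified copy of the powers list for every position.

-- ===== PORT A =====
def max_sum_with_one_multiplication (numbers : List Int) : Int :=
  let n : Int := numbers.length
  -- powers = [num ** (i + 1) for i, num in enumerate(numbers)]
  let powers : List Int := (PySem.List.enumerate numbers 0).map (fun p => p.2 ^ (p.1 + 1).toNat)
  let max_sum := powers.sum
  (PySem.List.pyRange 0 (n - 1) 1).foldl (fun max_sum i =>
    -- modified_powers = powers[:]; modified_powers[i] = powers[i] * powers[i + 1]
    let modified := PySem.List.pySetD powers i (PySem.List.pyGetD powers i 0 * PySem.List.pyGetD powers (i + 1) 0)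
    -- modified_powers.pop(i + 1)  (always in range for i in range(n-1); getD branch unreachable)
    let modified := ((PySem.List.pop? modified (i + 1)).map (·.2)).getD modified
    max max_sum modified.sum) max_sum

-- ===== PORT B =====
def max_sum_with_one_multiplication_alt (numbers : List Int) : Int :=
  let powers : List Int := (PySem.List.enumerate numbers 0).map (fun p => p.2 ^ (p.1 + 1).toNat)
  let total := powers.sum
  (powers.zip powers.tail).foldl (fun best ab =>
    let cand := total - ab.1 - ab.2 + ab.1 * ab.2
    if best < cand then cand else best) total

-- ===== PRECONDITION & SPEC =====
def Spec_max_sum_with_one_multiplication (numbers : List Int) (out : Int) : Prop := out = max_sum_with_one_multiplication_alt numbers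
instance (numbers : List Int) (out : Int) : Decidable (Spec_max_sum_with_one_multiplication numbers out) := by unfold Spec_max_sum_with_one_multiplication; infer_instance

-- ===== CLAIM (what is proved, stated in full; the proofs are below) =====
def Claim_equal_max_sum_with_one_multiplication : Prop := ∀ (numbers : List Int), Dom_max_sum_with_one_multiplication numbers → Spec_max_sum_with_one_multiplication numbers (max_sum_with_one_multiplication numbers)


-- ===== LEMMAS AND PROOFS =====

-- sum of "set index k to ps[k]*ps[k+1], then erase index k+1"
lemma sum_set_erase (ps : List Int) (k : Nat) (h : k + 1 < ps.length) :
    ((ps.set k (ps[k] * ps[k + 1])).eraseIdx (k + 1)).sum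
      = ps.sum - ps[k] - ps[k + 1] + ps[k] * ps[k + 1] := by
  induction ps generalizing k with
  | nil => simp at h
  | cons a rest ih =>
    cases k with
    | zero =>
      cases rest with
      | nil => simp at h
      | cons b r => simp [List.eraseIdx]; ring
    | succ k =>
      have h' : k + 1 < rest.length := by simpa using h
      simp [ih k h']
      ring

-- both loops fold over the same list of candidate values, one with max, one with an if
lemma fold_max_eq_fold_if (l1 : List Int) (l2 : List (Int × Int)) (f : Int → Int)
    (g : Int × Int → Int) (s : Int) (h : l1.map f = l2.map g) :
    l1.foldl (fun m i => max m (f i)) s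
      = l2.foldl (fun b ab => if b < g ab then g ab else b) s := by
  have hif : (fun b ab => if b < g ab then g ab else b) = (fun b ab => max b (g ab)) := by
    funext b ab
    split_ifs <;> omega
  rw [hif, ← List.foldl_map (f := f), ← List.foldl_map (f := g), h]

-- the candidate at index k is total - ps[k] - ps[k+1] + ps[k]*ps[k+1]
lemma cands_eq (ps : List Int) :
    (PySem.List.pyRange 0 ((ps.length : Int) - 1) 1).map (fun i =>
      ((Option.map (fun x => x.2) (PySem.List.pop?
          (PySem.List.pySetD ps i (PySem.List.pyGetD ps i 0 * PySem.List.pyGetD ps (i + 1) 0)) (i + 1))).getD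
          (PySem.List.pySetD ps i (PySem.List.pyGetD ps i 0 * PySem.List.pyGetD ps (i + 1) 0))).sum)
    = (ps.zip ps.tail).map (fun ab => ps.sum - ab.1 - ab.2 + ab.1 * ab.2) := by
  apply List.ext_getElem
  · simp [PySem.List.length_pyRange_one]
  · intro k h1 h2
    have hk : k + 1 < ps.length := by
      simp [PySem.List.length_pyRange_one] at h1
      omega
    have hc : ((0 : Int) + (k : Int)) = ((k : Nat) : Int) := by ring
    have hc1 : (((k : Nat) : Int) + 1) = (((k + 1 : Nat)) : Int) := by push_cast; ring
    simp only [List.getElem_map, PySem.List.getElem_pyRange_one, hc, hc1,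
      PySem.List.pyGetD_natCast, PySem.List.pySetD_natCast]
    rw [PySem.List.pop?_natCast (h := by simpa using hk)]
    simp only [Option.map_some, Option.getD_some]
    rw [List.getD_eq_getElem ps 0 (by omega), List.getD_eq_getElem ps 0 hk,
      sum_set_erase ps k hk]
    simp [List.getElem_zip, List.getElem_tail]

theorem pv_main (numbers : List Int) :
    max_sum_with_one_multiplication numbers = max_sum_with_one_multiplication_alt numbers := by
  unfold max_sum_with_one_multiplication max_sum_with_one_multiplication_alt
  rw [show ((numbers.length : Int)) = ((((PySem.List.enumerate numbers 0).map (fun p => p.2 ^ (p.1 + 1).toNat)).length : Int)) by simp [PySem.List.length_enumerate]]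
  exact fold_max_eq_fold_if _ _ _ _ _ (cands_eq _)

-- ===== VERDICT (by name: the statement is the Claim_ definition above) =====
theorem max_sum_with_one_multiplication_spec : Claim_equal_max_sum_with_one_multiplication := by
  intro numbers _
  unfold Spec_max_sum_with_one_multiplication
  exact pv_main numbers
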